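-- pv_equiv track=rewrite | github.com/DreamSpoon/AMH2B | AMH2B/template.py | get_mat_template_name
-- ===== SOURCE A (Python) =====
-- def get_mat_template_name(orig_name, delim, delim_count):
--     pos = len(orig_name)
--     c = 0
--     while c < delim_count:
--         pos = orig_name.rfind(delim[0], 0, pos)
--         if pos < 0:
--             break
--         c = c + 1
--     if pos < 0 or pos == len(orig_name):
--         return orig_name
--     else:
--         return orig_name[pos+1:len(orig_name)]
-- ===== SOURCE B (Python) =====
-- def get_mat_template_name(orig_name, delim, delim_count):
--     if delim_count < 1:
--         return orig_name
--     parts = orig_name.split(delim[0])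
--     return delim[0].join(parts[-delim_count:])
-- ===== Notes on version B (the rewrite author's own statement) =====
-- stated objective: faster
-- what changed: B replaces A's Python-level while-loop of repeated right-anchored rfind scans with a single C-level split on the delimiter character, a tail slice of the parts list and a rejoin.
import Mathlib
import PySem

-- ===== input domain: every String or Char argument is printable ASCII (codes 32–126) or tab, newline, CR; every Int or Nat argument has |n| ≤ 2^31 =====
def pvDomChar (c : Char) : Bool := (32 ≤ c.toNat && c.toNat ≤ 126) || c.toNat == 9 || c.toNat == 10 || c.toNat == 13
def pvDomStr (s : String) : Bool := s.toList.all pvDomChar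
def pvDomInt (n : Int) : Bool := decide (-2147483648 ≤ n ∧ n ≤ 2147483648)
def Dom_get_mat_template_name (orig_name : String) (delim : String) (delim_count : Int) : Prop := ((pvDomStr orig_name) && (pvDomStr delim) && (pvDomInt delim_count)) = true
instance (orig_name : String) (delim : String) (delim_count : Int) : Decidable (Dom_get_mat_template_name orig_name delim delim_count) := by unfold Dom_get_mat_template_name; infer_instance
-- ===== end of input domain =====

-- B replaces A's repeated right-anchored rfind scans by one split on the delimiter
-- character plus a tail slice and rejoin (same return value wherever A returns; a timing run
-- measured B faster by a constant factor).

-- ===== PORT A =====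
-- the rfindFrom result for end-bound pos is < pos or -1 (termination of the while loop)
theorem pvRfindGoLt (s : List Char) (ch : Char) (j : Nat) :
    PySem.Chars.rfind.go s [ch] j = -1 ∨
      ∃ k : Nat, PySem.Chars.rfind.go s [ch] j = (k : Int) ∧ k ≤ j ∧ s[k]? = some ch := by
  induction j with
  | zero =>
    by_cases h : [ch].isPrefixOf s
    · right; refine ⟨0, ?_, le_refl _, ?_⟩
      · simp [PySem.Chars.rfind.go, h]
      · cases s with
        | nil => simp [List.isPrefixOf] at h
        | cons a t => simp [List.isPrefixOf] at h; simp [← h]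
    · left; simp [PySem.Chars.rfind.go, h]
  | succ j ih =>
    by_cases h : [ch].isPrefixOf (List.drop (j+1) s)
    · right; refine ⟨j+1, ?_, le_refl _, ?_⟩
      · simp [PySem.Chars.rfind.go, h]
      · rcases hd : List.drop (j+1) s with _ | ⟨a, t⟩
        · rw [hd] at h; simp [List.isPrefixOf] at h
        · rw [hd] at h; simp [List.isPrefixOf] at h
          have : s[j+1]? = some a := by
            have := congrArg List.head? hd
            simpa [List.head?_drop] using this
          simp [this, ← h]
    · have : PySem.Chars.rfind.go s [ch] (j+1) = PySem.Chars.rfind.go s [ch] j := by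
        simp [PySem.Chars.rfind.go, h]
      rw [this]
      rcases ih with h1 | ⟨k, hk, hkle, hks⟩
      · left; exact h1
      · right; exact ⟨k, hk, Nat.le_succ_of_le hkle, hks⟩

-- rfindFrom with start 0 and a Nat end bound is rfind on the corresponding prefix
theorem pvRF (l : List Char) (ch : Char) (pos : Nat) :
    PySem.Chars.rfindFrom l [ch] 0 (some (pos : Int)) = PySem.Chars.rfind (l.take pos) [ch] := by
  unfold PySem.Chars.rfindFrom
  have hc : ¬ ((pos : Int) < 0) := by omega
  by_cases hnp : (l.length : Int) < (pos : Nat)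
  · have h1 : l.take pos = l := by
      apply List.take_of_length_le; exact_mod_cast le_of_lt hnp
    by_cases h : PySem.Chars.rfind l [ch] = -1 <;> simp [hnp, h1, h]
  · by_cases h : PySem.Chars.rfind (l.take pos) [ch] = -1 <;> simp [hnp, hc, h]

theorem pvRfindFromLt (l : List Char) (ch : Char) (pos : Nat) (p : Int)
    (hp : p = PySem.Chars.rfindFrom l [ch] 0 (some (pos : Int))) (hnn : ¬ p < 0) :
    p.toNat < pos := by
  rw [pvRF] at hp
  unfold PySem.Chars.rfind at hp
  rcases pvRfindGoLt (l.take pos) ch (l.take pos).length with h1 | ⟨k, hk, _, hks⟩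
  · rw [h1] at hp; omega
  · rw [hk] at hp
    have hklt : k < (l.take pos).length := by
      have := List.getElem?_eq_some_iff.mp hks; exact this.1
    have : (l.take pos).length ≤ pos := by simp
    omega

def pvLoopA (l : List Char) (ch : Char) (delim_count : Int) (c : Int) (pos : Nat) : Int :=
  -- while c < delim_count: pos = orig_name.rfind(delim[0], 0, pos); if pos < 0: break; c += 1
  -- (pos is a valid index or the loop's start value, hence a Nat; the broken-out -1 is returned directly)
  if c < delim_count then
    let p := PySem.Chars.rfindFrom l [ch] 0 (some (pos : Int))
    if h : p < 0 then p
    else pvLoopA l ch delim_count (c + 1) p.toNat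
  else (pos : Int)
termination_by pos
decreasing_by exact pvRfindFromLt l ch pos _ rfl h

def get_mat_template_name (orig_name : String) (delim : String) (delim_count : Int) : String :=
  let l := orig_name.toList
  -- delim[0]; Pre_ guarantees delim ≠ "" whenever the loop body (the only user of it) runs
  let ch := delim.toList.headD ' '
  let pos := pvLoopA l ch delim_count 0 l.length
  if pos < 0 ∨ pos = (l.length : Int) then orig_name
  else String.ofList (PySem.List.slice l (some (pos + 1)) (some (l.length : Int)))

-- ===== PORT B =====
def get_mat_template_name_alt (orig_name : String) (delim : String) (delim_count : Int) : String :=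
  if delim_count < 1 then orig_name
  else
    let ch := delim.toList.headD ' '      -- delim[0]; Pre_ guarantees delim ≠ "" on this branch
    let parts := PySem.Chars.splitOn orig_name.toList [ch]
    String.ofList (PySem.Chars.join [ch] (PySem.List.slice parts (some (-delim_count)) none))

-- ===== PRECONDITION & SPEC =====
-- Pre_ excludes exactly the inputs where A raises IndexError: delim = "" with delim_count ≥ 1
-- (B raises there too).
def Pre_get_mat_template_name (orig_name : String) (delim : String) (delim_count : Int) : Prop :=
  delim_count < 1 ∨ delim ≠ ""
instance (orig_name : String) (delim : String) (delim_count : Int) : Decidable (Pre_get_mat_template_name orig_name delim delim_count) := by unfold Pre_get_mat_template_name; infer_instance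
def pvWitness_get_mat_template_name : String × String × Int := ("a.b.c", ".", 2)

def Spec_get_mat_template_name (orig_name : String) (delim : String) (delim_count : Int) (out : String) : Prop := out = get_mat_template_name_alt orig_name delim delim_count
instance (orig_name : String) (delim : String) (delim_count : Int) (out : String) : Decidable (Spec_get_mat_template_name orig_name delim delim_count out) := by unfold Spec_get_mat_template_name; infer_instance

-- ===== CLAIM (what is proved, stated in full; the proofs are below) =====
def Claim_equal_get_mat_template_name : Prop := ∀ (orig_name : String) (delim : String) (delim_count : Int), Dom_get_mat_template_name orig_name delim delim_count → Pre_get_mat_template_name orig_name delim delim_count → Spec_get_mat_template_name orig_name delim delim_count (get_mat_template_name orig_name delim delim_count)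

-- ===== LEMMAS AND PROOFS =====

-- [ch] is a prefix of drop i s exactly when s[i] is ch
theorem pvPrefixChar (s : List Char) (ch : Char) (i : Nat) :
    [ch].isPrefixOf (s.drop i) = true ↔ s[i]? = some ch := by
  rcases hd : s.drop i with _ | ⟨a, t⟩
  · have : s.length ≤ i := by
      have := congrArg List.length hd; simp at this; omega
    simp [List.isPrefixOf, List.getElem?_eq_none this]
  · have ha : s[i]? = some a := by
      have := congrArg List.head? hd
      simpa [List.head?_drop] using this
    simp [List.isPrefixOf, ha]
    exact eq_comm

-- rfind.go returns the greatest in-bound occurrence below its bound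
theorem pvGoLast (s : List Char) (ch : Char) (k : Nat) (hk : s[k]? = some ch)
    (hno : ∀ i, k < i → s[i]? ≠ some ch) :
    ∀ j, k ≤ j → PySem.Chars.rfind.go s [ch] j = (k : Int) := by
  intro j
  induction j with
  | zero =>
    intro hj
    have hk0 : k = 0 := Nat.le_zero.mp hj
    subst hk0
    have : [ch].isPrefixOf (s.drop 0) = true := (pvPrefixChar s ch 0).mpr hk
    rw [List.drop_zero] at this
    simp only [PySem.Chars.rfind.go, this]
    norm_num
  | succ j ih =>
    intro hj
    by_cases he : k = j + 1
    · subst he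
      have : [ch].isPrefixOf (s.drop (j+1)) = true := (pvPrefixChar s ch (j+1)).mpr hk
      simp [PySem.Chars.rfind.go, this]
    · have hkj : k ≤ j := by omega
      have : ¬ ([ch].isPrefixOf (s.drop (j+1)) = true) := by
        intro hpre
        exact hno (j+1) (by omega) ((pvPrefixChar s ch (j+1)).mp hpre)
      simp only [PySem.Chars.rfind.go]
      rw [if_neg this]
      exact ih hkj

-- rfind of a character absent from the string is -1
theorem pvRfindNone (s : List Char) (ch : Char) (h : ch ∉ s) :
    PySem.Chars.rfind s [ch] = -1 := by
  unfold PySem.Chars.rfind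
  rcases pvRfindGoLt s ch s.length with h1 | ⟨k, hk, _, hks⟩
  · exact h1
  · exact absurd (List.mem_of_getElem? hks) h
-- rfind finds the last occurrence
theorem pvRfindLast (s₁ s₂ : List Char) (ch : Char) (h : ch ∉ s₂) :
    PySem.Chars.rfind (s₁ ++ ch :: s₂) [ch] = (s₁.length : Int) := by
  unfold PySem.Chars.rfind
  apply pvGoLast
  · rw [List.getElem?_append_right (le_refl _)]; simp
  · intro i hi heq
    have hi' : s₁.length ≤ i := by omega
    rw [List.getElem?_append_right hi'] at heq
    rcases Nat.exists_eq_add_of_lt hi with ⟨m, hm⟩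
    have : i - s₁.length = m + 1 := by omega
    rw [this] at heq
    simp at heq
    exact h (List.mem_of_getElem? heq)
  · simp only [List.length_append, List.length_cons]; omega

-- a negative rfindFrom result is exactly -1
theorem pvRfindFromNeg (l : List Char) (ch : Char) (pos : Nat)
    (hp : PySem.Chars.rfindFrom l [ch] 0 (some (pos : Int)) < 0) :
    PySem.Chars.rfindFrom l [ch] 0 (some (pos : Int)) = -1 := by
  rw [pvRF] at hp ⊢
  unfold PySem.Chars.rfind at hp ⊢
  rcases pvRfindGoLt (l.take pos) ch (l.take pos).length with h1 | ⟨k, hk, _, _⟩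
  · exact h1
  · rw [hk] at hp; omega

-- the while loop depends only on the counter difference
theorem pvLoopShift (l : List Char) (ch : Char) :
    ∀ pos : Nat, ∀ dc c dc' c' : Int, dc - c = dc' - c' →
      pvLoopA l ch dc c pos = pvLoopA l ch dc' c' pos := by
  intro pos
  induction pos using Nat.strong_induction_on with
  | _ pos IH =>
    intro dc c dc' c' hd
    rw [pvLoopA, pvLoopA]
    by_cases hc : c < dc
    · have hc' : c' < dc' := by omega
      simp only [hc, hc', if_pos]
      by_cases hp : PySem.Chars.rfindFrom l [ch] 0 (some (pos : Int)) < 0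
      · simp [hp]
      · simp only [hp]
        exact IH _ (pvRfindFromLt l ch pos _ rfl hp) _ _ _ _ (by omega)
    · have hc' : ¬ c' < dc' := by omega
      simp [hc, hc']

-- the while loop only reads the prefix of the string below its start position
theorem pvLoopPrefix (s₁ t : List Char) (ch : Char) :
    ∀ pos : Nat, pos ≤ s₁.length → ∀ dc c : Int,
      pvLoopA (s₁ ++ t) ch dc c pos = pvLoopA s₁ ch dc c pos := by
  intro pos
  induction pos using Nat.strong_induction_on with
  | _ pos IH =>
    intro hle dc c
    rw [pvLoopA, pvLoopA]
    by_cases hc : c < dc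
    · simp only [hc, if_pos]
      have htake : (s₁ ++ t).take pos = s₁.take pos := List.take_append_of_le_length hle
      have hsame : PySem.Chars.rfindFrom (s₁ ++ t) [ch] 0 (some (pos : Int))
          = PySem.Chars.rfindFrom s₁ [ch] 0 (some (pos : Int)) := by
        rw [pvRF, pvRF, htake]
      rw [hsame]
      by_cases hp : PySem.Chars.rfindFrom s₁ [ch] 0 (some (pos : Int)) < 0
      · simp [hp]
      · simp only [hp]
        have hlt := pvRfindFromLt s₁ ch pos _ rfl hp
        exact IH _ hlt (by omega) dc (c+1)
    · simp [hc]

-- the loop returns -1 or a Nat bounded by its start position, strictly when it iterates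
theorem pvLoopLe (l : List Char) (ch : Char) (dc : Int) :
    ∀ pos : Nat, ∀ c : Int, pvLoopA l ch dc c pos = -1 ∨
      ∃ r : Nat, pvLoopA l ch dc c pos = (r : Int) ∧ r ≤ pos := by
  intro pos
  induction pos using Nat.strong_induction_on with
  | _ pos IH =>
    intro c
    rw [pvLoopA]
    by_cases hc : c < dc
    · simp only [hc, if_pos]
      by_cases hp : PySem.Chars.rfindFrom l [ch] 0 (some (pos : Int)) < 0
      · simp only [hp, dif_pos]
        exact Or.inl (pvRfindFromNeg l ch pos hp)
      · simp only [hp]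
        have hlt := pvRfindFromLt l ch pos _ rfl hp
        rcases IH _ hlt (c+1) with h1 | ⟨r, hr, hrle⟩
        · exact Or.inl h1
        · exact Or.inr ⟨r, hr, by omega⟩
    · exact Or.inr ⟨pos, by simp [hc], le_refl _⟩

theorem pvLoopLt (l : List Char) (ch : Char) (dc : Int) (pos : Nat) (c : Int) (hc : c < dc) :
    pvLoopA l ch dc c pos = -1 ∨
      ∃ r : Nat, pvLoopA l ch dc c pos = (r : Int) ∧ r < pos := by
  rw [pvLoopA]
  simp only [hc, if_pos]
  by_cases hp : PySem.Chars.rfindFrom l [ch] 0 (some (pos : Int)) < 0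
  · simp only [hp, dif_pos]
    exact Or.inl (pvRfindFromNeg l ch pos hp)
  · simp only [hp]
    have hlt := pvRfindFromLt l ch pos _ rfl hp
    rcases pvLoopLe l ch dc _ (c+1) with h1 | ⟨r, hr, hrle⟩
    · exact Or.inl h1
    · exact Or.inr ⟨r, hr, by omega⟩

-- str.split for a single-character separator, fuel-free
def pvSplit (ch : Char) : List Char → List (List Char)
  | [] => [[]]
  | c :: rest => if c = ch then [] :: pvSplit ch rest
                 else (pvSplit ch rest).modifyHead (fun t => c :: t)

theorem pvSplit_ne_nil (ch : Char) (l : List Char) : pvSplit ch l ≠ [] := by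
  induction l with
  | nil => simp [pvSplit]
  | cons c rest ih =>
    simp only [pvSplit]
    split_ifs
    · simp
    · rcases hm : pvSplit ch rest with _ | ⟨hh, tt⟩
      · exact absurd hm ih
      · simp

-- PySem's splitOn with a single-character separator is pvSplit
theorem pvSplitGo (ch : Char) : ∀ l : List Char, ∀ fuel : Nat, ∀ cur : List Char,
    ∀ acc : List (List Char),
    l.length < fuel →
    PySem.Chars.splitOn.go [ch] fuel l cur acc
      = acc.reverse ++ (pvSplit ch l).modifyHead (fun t => cur.reverse ++ t) := by
  intro l
  induction l with
  | nil =>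
    intro fuel cur acc hf
    cases fuel with
    | zero => omega
    | succ f =>
      have e : PySem.Chars.splitOn.go [ch] (f+1) [] cur acc = (cur.reverse :: acc).reverse := rfl
      rw [e]
      simp [pvSplit]
  | cons c rest ih =>
    intro fuel cur acc hf
    cases fuel with
    | zero => omega
    | succ f =>
      have e : PySem.Chars.splitOn.go [ch] (f+1) (c :: rest) cur acc
          = if [ch].isPrefixOf (c :: rest) = true
            then PySem.Chars.splitOn.go [ch] f rest [] (cur.reverse :: acc)
            else PySem.Chars.splitOn.go [ch] f rest (c :: cur) acc := rfl
      rw [e]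
      by_cases hc : ch = c
      · have hpre : [ch].isPrefixOf (c :: rest) = true := by
          simp [List.isPrefixOf, hc]
        rw [if_pos hpre, ih f [] (cur.reverse :: acc) (by simp at hf; omega)]
        simp [pvSplit, hc.symm]
        cases pvSplit ch rest <;> rfl
      · have hpre : ¬ ([ch].isPrefixOf (c :: rest) = true) := by
          simp [List.isPrefixOf]; exact hc
        rw [if_neg hpre, ih f (c :: cur) acc (by simp at hf; omega)]
        have hns : c ≠ ch := fun he => hc he.symm
        rcases hm : pvSplit ch rest with _ | ⟨hh, tt⟩
        · exact absurd hm (pvSplit_ne_nil ch rest)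
        · simp [pvSplit, hns, hm]

theorem pvSplitOn_eq (ch : Char) (l : List Char) :
    PySem.Chars.splitOn l [ch] = pvSplit ch l := by
  unfold PySem.Chars.splitOn
  rw [pvSplitGo ch l (l.length + 1) [] [] (by omega)]
  rcases hm : pvSplit ch l with _ | ⟨hh, tt⟩
  · exact absurd hm (pvSplit_ne_nil ch l)
  · simp

theorem pvSplit_no_occ (ch : Char) (l : List Char) (h : ch ∉ l) : pvSplit ch l = [l] := by
  induction l with
  | nil => rfl
  | cons c rest ih =>
    simp at h
    simp [pvSplit, Ne.symm h.1, ih h.2]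

theorem pvSplit_last (ch : Char) (s₁ s₂ : List Char) (h : ch ∉ s₂) :
    pvSplit ch (s₁ ++ ch :: s₂) = pvSplit ch s₁ ++ [s₂] := by
  induction s₁ with
  | nil => simp [pvSplit, pvSplit_no_occ ch s₂ h]
  | cons c rest ih =>
    by_cases hc : c = ch
    · simp [pvSplit, hc, ih]
    · simp only [List.cons_append, pvSplit, hc, ih]
      rcases hm : pvSplit ch rest with _ | ⟨hh, tt⟩
      · exact absurd hm (pvSplit_ne_nil ch rest)
      · simp

-- join over a snoc
theorem pvJoinSnoc (ch : Char) (xs : List (List Char)) (y : List Char) (h : xs ≠ []) :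
    PySem.Chars.join [ch] (xs ++ [y]) = PySem.Chars.join [ch] xs ++ ch :: y := by
  induction xs with
  | nil => exact absurd rfl h
  | cons x t ih =>
    cases t with
    | nil => simp [PySem.Chars.join_cons_cons, PySem.Chars.join_singleton]
    | cons x' t' =>
      have h1 : (x :: x' :: t') ++ [y] = x :: (x' :: (t' ++ [y])) := by simp
      have h2 : x' :: (t' ++ [y]) = (x' :: t') ++ [y] := by simp
      rw [h1, PySem.Chars.join_cons_cons, h2, ih (by simp), PySem.Chars.join_cons_cons]
      simp

-- A's loop-and-slice and B's split-slice-join, at the list level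
def pvA (l : List Char) (ch : Char) (dc : Int) : List Char :=
  if pvLoopA l ch dc 0 l.length < 0 ∨ pvLoopA l ch dc 0 l.length = (l.length : Int) then l
  else l.drop ((pvLoopA l ch dc 0 l.length).toNat + 1)

def pvB (l : List Char) (ch : Char) (dc : Int) : List Char :=
  PySem.Chars.join [ch] ((pvSplit ch l).drop ((pvSplit ch l).length - dc.toNat))

-- decomposition at the last occurrence
theorem pvLastOcc (ch : Char) (l : List Char) (h : ch ∈ l) :
    ∃ s₁ s₂ : List Char, l = s₁ ++ ch :: s₂ ∧ ch ∉ s₂ := by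
  induction l with
  | nil => simp at h
  | cons c rest ih =>
    by_cases hr : ch ∈ rest
    · rcases ih hr with ⟨s₁, s₂, he, hn⟩
      exact ⟨c :: s₁, s₂, by simp [he], hn⟩
    · have : c = ch := by
        rcases List.mem_cons.mp h with h1 | h2
        · exact h1.symm
        · exact absurd h2 hr
      exact ⟨[], rest, by simp [this], hr⟩

theorem pvLoopLow (l : List Char) (ch : Char) (dc : Int) (h : dc < 1) :
    pvLoopA l ch dc 0 l.length = (l.length : Int) := by
  rw [pvLoopA]
  simp [show ¬ ((0:Int) < dc) by omega]

theorem pvLoopNoOcc (l : List Char) (ch : Char) (dc : Int) (h : ch ∉ l) (hdc : 1 ≤ dc) :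
    pvLoopA l ch dc 0 l.length = -1 := by
  have hr : PySem.Chars.rfindFrom l [ch] 0 (some (l.length : Int)) = -1 := by
    rw [pvRF, List.take_length]
    exact pvRfindNone l ch h
  rw [pvLoopA]
  simp [show (0:Int) < dc by omega, hr]

theorem pvANoOcc (l : List Char) (ch : Char) (dc : Int) (h : ch ∉ l) (hdc : 1 ≤ dc) :
    pvA l ch dc = l := by
  unfold pvA
  rw [pvLoopNoOcc l ch dc h hdc]
  norm_num

theorem pvBNoOcc (l : List Char) (ch : Char) (dc : Int) (h : ch ∉ l) (hdc : 1 ≤ dc) :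
    pvB l ch dc = l := by
  unfold pvB
  rw [pvSplit_no_occ ch l h]
  have h0 : ([l] : List (List Char)).length - dc.toNat = 0 := by simp; omega
  rw [h0, List.drop_zero, PySem.Chars.join_singleton]

-- the first loop iteration moves to the last occurrence and behaves like the loop on s₁
theorem pvLoopStep (s₁ s₂ : List Char) (ch : Char) (dc : Int) (h2 : ch ∉ s₂) (hdc : 1 ≤ dc) :
    pvLoopA (s₁ ++ ch :: s₂) ch dc 0 (s₁ ++ ch :: s₂).length
      = pvLoopA s₁ ch (dc - 1) 0 s₁.length := by
  have hr : PySem.Chars.rfindFrom (s₁ ++ ch :: s₂) [ch] 0 (some ((s₁ ++ ch :: s₂).length : Int))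
      = (s₁.length : Int) := by
    rw [pvRF, List.take_length]
    exact pvRfindLast s₁ s₂ ch h2
  rw [pvLoopA]
  simp only [show (0:Int) < dc by omega, if_pos, hr]
  rw [dif_neg (by omega)]
  simp only [Int.toNat_natCast, zero_add]
  rw [pvLoopPrefix s₁ (ch :: s₂) ch s₁.length (le_refl _) dc 1]
  exact pvLoopShift s₁ ch s₁.length dc 1 (dc - 1) 0 (by omega)

theorem pvMain (ch : Char) : ∀ n : Nat, ∀ l : List Char, l.length ≤ n → ∀ dc : Int, 1 ≤ dc →
    pvA l ch dc = pvB l ch dc := by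
  intro n
  induction n with
  | zero =>
    intro l hl dc hdc
    have : l = [] := List.length_eq_zero_iff.mp (by omega)
    subst this
    rw [pvANoOcc _ _ _ (by simp) hdc, pvBNoOcc _ _ _ (by simp) hdc]
  | succ n ih =>
    intro l hl dc hdc
    by_cases hch : ch ∈ l
    · rcases pvLastOcc ch l hch with ⟨s₁, s₂, rfl, hn2⟩
      have hlen : (s₁ ++ ch :: s₂).length = s₁.length + s₂.length + 1 := by simp; omega
      have hstep := pvLoopStep s₁ s₂ ch dc hn2 hdc
      -- the B side decomposes over the last part
      have hP := pvSplit_last ch s₁ s₂ hn2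
      have hPne := pvSplit_ne_nil ch s₁
      have hPlen : 1 ≤ (pvSplit ch s₁).length := List.length_pos_iff.mpr hPne
      by_cases hdc1 : dc = 1
      · subst hdc1
        have hq : pvLoopA s₁ ch (1 - 1) 0 s₁.length = (s₁.length : Int) :=
          pvLoopLow s₁ ch (1 - 1) (by norm_num)
        have hA : pvA (s₁ ++ ch :: s₂) ch 1 = s₂ := by
          unfold pvA
          rw [hstep, hq]
          rw [if_neg (by simp only [hlen]; omega)]
          simp only [Int.toNat_natCast]
          rw [show s₁ ++ ch :: s₂ = (s₁ ++ [ch]) ++ s₂ by simp]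
          rw [List.drop_left' (by simp)]
        have hB : pvB (s₁ ++ ch :: s₂) ch 1 = s₂ := by
          unfold pvB
          rw [hP]
          have h1 : (pvSplit ch s₁ ++ [s₂]).length - (1:Int).toNat = (pvSplit ch s₁).length := by
            simp
          rw [h1, List.drop_append_of_le_length (le_refl _), List.drop_length]
          simp [PySem.Chars.join_singleton]
        rw [hA, hB]
      · -- dc ≥ 2
        have hdc2 : 2 ≤ dc := by omega
        have hAeq : pvA (s₁ ++ ch :: s₂) ch dc = pvA s₁ ch (dc - 1) ++ ch :: s₂ := by
          rcases pvLoopLt s₁ ch (dc - 1) s₁.length 0 (by omega) with hq | ⟨r, hq, hrlt⟩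
          · unfold pvA
            rw [hstep, hq]
            norm_num
          · unfold pvA
            rw [hstep, hq]
            rw [if_neg (by simp only [hlen]; omega)]
            rw [if_neg (by omega)]
            simp only [Int.toNat_natCast]
            rw [List.drop_append_of_le_length (by omega)]
        have hBeq : pvB (s₁ ++ ch :: s₂) ch dc = pvB s₁ ch (dc - 1) ++ ch :: s₂ := by
          unfold pvB
          rw [hP]
          have hk : (pvSplit ch s₁ ++ [s₂]).length - dc.toNat
              = (pvSplit ch s₁).length - (dc - 1).toNat := by
            simp; omega
          rw [hk, List.drop_append_of_le_length (by omega)]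
          apply pvJoinSnoc
          apply List.ne_nil_of_length_pos
          rw [List.length_drop]
          omega
        rw [hAeq, hBeq, ih s₁ (by omega) (dc - 1) (by omega)]
    · rw [pvANoOcc _ _ _ hch hdc, pvBNoOcc _ _ _ hch hdc]

-- the port of A with its local bindings zeta-expanded (definitional)
theorem pvPortAEq (o d : String) (dc : Int) : get_mat_template_name o d dc =
    (if pvLoopA o.toList (d.toList.headD ' ') dc 0 o.toList.length < 0 ∨
        pvLoopA o.toList (d.toList.headD ' ') dc 0 o.toList.length = (o.toList.length : Int)
     then o
     else String.ofList (PySem.List.slice o.toList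
       (some (pvLoopA o.toList (d.toList.headD ' ') dc 0 o.toList.length + 1))
       (some (o.toList.length : Int)))) := rfl

-- port glue
theorem pvALow (l : List Char) (ch : Char) (dc : Int) (h : dc < 1) : pvA l ch dc = l := by
  unfold pvA
  rw [pvLoopA]
  simp [show ¬ ((0:Int) < dc) by omega]


theorem pvPortA (o d : String) (dc : Int) :
    get_mat_template_name o d dc = String.ofList (pvA o.toList (d.toList.headD ' ') dc) := by
  rw [pvPortAEq]
  unfold pvA
  rcases pvLoopLe o.toList (d.toList.headD ' ') dc o.toList.length 0 with h1 | ⟨r, hr, hrle⟩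
  · rw [h1]
    simp [String.ofList_toList]
  · rw [hr]
    by_cases he : (r : Int) = (o.toList.length : Int)
    · simp [he, String.ofList_toList]
    · have hcond : ¬ (((r:Int) < 0) ∨ (r:Int) = (o.toList.length : Int)) :=
        not_or.mpr ⟨by omega, he⟩
      rw [if_neg hcond, if_neg hcond]
      congr 1
      have h2 : ((r:Int) + 1) = ((r + 1 : Nat) : Int) := by omega
      rw [h2, PySem.List.slice_natCast]
      have hlen : (o.toList.drop (r+1)).length ≤ o.toList.length - (r+1) := by
        simp
      rw [List.take_of_length_le hlen]
      simp

-- the port of B with its local bindings zeta-expanded (definitional)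
theorem pvPortBEq (o d : String) (dc : Int) : get_mat_template_name_alt o d dc =
    (if dc < 1 then o
     else String.ofList (PySem.Chars.join [d.toList.headD ' ']
       (PySem.List.slice (PySem.Chars.splitOn o.toList [d.toList.headD ' '])
         (some (-dc)) none))) := rfl

theorem pvPortB (o d : String) (dc : Int) (h : ¬ dc < 1) :
    get_mat_template_name_alt o d dc = String.ofList (pvB o.toList (d.toList.headD ' ') dc) := by
  rw [pvPortBEq, if_neg h]
  unfold pvB
  rw [pvSplitOn_eq]
  have hneg : -dc = -((dc.toNat : Nat) : Int) := by omega
  rw [hneg, PySem.List.slice_from_neg_natCast _ dc.toNat (by omega)]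

-- ===== VERDICT (by name: the statement is the Claim_ definition above) =====
theorem get_mat_template_name_spec : Claim_equal_get_mat_template_name := by
  intro o d dc _ _
  unfold Spec_get_mat_template_name
  by_cases h : dc < 1
  · rw [pvPortA, pvALow _ _ _ h]
    have hB : get_mat_template_name_alt o d dc = o := by
      unfold get_mat_template_name_alt; simp [h]
    rw [hB, String.ofList_toList]
  · rw [pvPortA, pvPortB o d dc h,
      pvMain _ o.toList.length o.toList (le_refl _) dc (by omega)]
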